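-- pv_equiv track=rewrite | github.com/RajashreeDahal4/Algorithms | amazon/efficient_sparse_matrix.py | create_transpose
-- ===== SOURCE A (Python) =====
-- def create_transpose(matrix):
--     transpose_matrix = {}
--     for i, row in enumerate(matrix):
--         for j, val in enumerate(row):
--             if val != 0:
--                 if j in transpose_matrix:
--                     transpose_matrix[j].append(i)
--                 else:
--                     transpose_matrix[j] = [i]
--     return transpose_matrix
-- ===== SOURCE B (Python) =====
-- def create_transpose(matrix):
--     pairs = [(j, i) for i, row in enumerate(matrix) for j, v in enumerate(row) if v != 0]
--     cols = dict.fromkeys(j for j, _ in pairs)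
--     return {j: [i for k, i in pairs if k == j] for j in cols}
-- ===== Notes on version B (the rewrite author's own statement) =====
-- stated objective: alternative
-- what changed: Replaces the mutating dict-building loop with a pure pipeline: one comprehension flattens the matrix into (column,row) pairs of nonzero entries, dict.fromkeys extracts the columns in first-appearance order, and a dict comprehension gathers each column's rows by filtering the pair list.
import Mathlib
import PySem

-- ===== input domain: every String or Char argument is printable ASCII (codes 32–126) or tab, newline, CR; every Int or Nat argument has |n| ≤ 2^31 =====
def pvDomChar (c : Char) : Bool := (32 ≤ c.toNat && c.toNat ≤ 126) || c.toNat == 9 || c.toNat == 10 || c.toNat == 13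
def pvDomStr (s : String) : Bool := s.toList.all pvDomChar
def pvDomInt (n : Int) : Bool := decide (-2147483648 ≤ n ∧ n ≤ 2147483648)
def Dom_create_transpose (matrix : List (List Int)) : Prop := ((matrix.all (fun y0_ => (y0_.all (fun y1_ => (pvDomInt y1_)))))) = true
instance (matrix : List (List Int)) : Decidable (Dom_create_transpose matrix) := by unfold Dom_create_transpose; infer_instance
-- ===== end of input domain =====

-- ===== PORT A =====
-- B changes the decomposition: A's single mutating dict-building loop becomes a pure
-- flatten / dedup / gather pipeline; same return value, no speed claim.
def create_transpose (matrix : List (List Int)) : List (Int × List Int) :=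
  ((PySem.List.enumerate matrix).foldl (fun d p =>
    (PySem.List.enumerate p.2).foldl (fun d q =>
      if q.2 ≠ 0 then
        (if d.contains q.1 then d.modify q.1 [] (fun l => l ++ [p.1])
         else d.insert q.1 [p.1])
      else d) d) PySem.Dict.empty).items

-- ===== PORT B =====
def create_transpose_alt (matrix : List (List Int)) : List (Int × List Int) :=
  let pairs := (PySem.List.enumerate matrix).flatMap (fun p =>
      ((PySem.List.enumerate p.2).filter (fun q => decide (q.2 ≠ 0))).map (fun q => (q.1, p.1)))
  let cols := PySem.List.dedup (pairs.map (fun q => q.1))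
  cols.map (fun j => (j, (pairs.filter (fun q => q.1 == j)).map (fun q => q.2)))

-- ===== PRECONDITION & SPEC =====
def Spec_create_transpose (matrix : List (List Int)) (out : List (Int × List Int)) : Prop := out = create_transpose_alt matrix
instance (matrix : List (List Int)) (out : List (Int × List Int)) : Decidable (Spec_create_transpose matrix out) := by unfold Spec_create_transpose; infer_instance

-- ===== CLAIM (what is proved, stated in full; the proofs are below) =====
def Claim_equal_create_transpose : Prop := ∀ (matrix : List (List Int)), Dom_create_transpose matrix → Spec_create_transpose matrix (create_transpose matrix)

-- ===== LEMMAS AND PROOFS =====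

-- A's two branches are one `modify`: on a missing key, `modify j [] (· ++ [i])` inserts `[i]`.
theorem pv_branch_eq_modify (d : PySem.Dict Int (List Int)) (j i : Int) :
    (if d.contains j then d.modify j [] (fun l => l ++ [i]) else d.insert j [i])
      = d.modify j [] (fun l => l ++ [i]) := by
  by_cases h : d.contains j = true
  · simp [h]
  · rw [if_neg (by simp [h]), PySem.Dict.modify,
      PySem.Dict.getD_of_not_contains d [] (Bool.eq_false_iff.mpr h), List.nil_append]

-- The inner row loop, with the val != 0 test folded into a filter and both branches one modify.
theorem pv_inner (i : Int) (l : List (Int × Int)) (d : PySem.Dict Int (List Int)) :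
    l.foldl (fun d q => if q.2 ≠ 0 then
        (if d.contains q.1 then d.modify q.1 [] (fun s => s ++ [i]) else d.insert q.1 [i])
      else d) d
      = (l.filter (fun q => decide (q.2 ≠ 0))).foldl
          (fun d q => d.modify q.1 [] (fun s => s ++ [i])) d := by
  induction l generalizing d with
  | nil => rfl
  | cons q t ih =>
    rw [List.foldl_cons, List.filter_cons]
    by_cases h : q.2 ≠ 0
    · rw [if_pos h, pv_branch_eq_modify, if_pos (by simp [h]), List.foldl_cons, ih]
    · rw [if_neg h, if_neg (by simp [not_not.mp h]), ih]

-- A's nested loop over the matrix is the single fold of the flattened (column, row) pair list.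
theorem pv_dict_eq_foldl_pairs (matrix : List (List Int)) :
    ((PySem.List.enumerate matrix).foldl (fun d p =>
      (PySem.List.enumerate p.2).foldl (fun d q =>
        if q.2 ≠ 0 then
          (if d.contains q.1 then d.modify q.1 [] (fun l => l ++ [p.1])
           else d.insert q.1 [p.1])
        else d) d) PySem.Dict.empty)
      = ((PySem.List.enumerate matrix).flatMap (fun p =>
          ((PySem.List.enumerate p.2).filter (fun q => decide (q.2 ≠ 0))).map (fun q => (q.1, p.1)))).foldl
          (fun d q => d.modify q.1 [] (fun l => l ++ [q.2])) PySem.Dict.empty := by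
  rw [List.foldl_flatMap]
  apply PySem.List.foldl_congr_mem
  intro d p _
  rw [pv_inner p.1, List.foldl_map]

theorem create_transpose_eq_alt (matrix : List (List Int)) :
    create_transpose matrix = create_transpose_alt matrix := by
  unfold create_transpose create_transpose_alt
  rw [pv_dict_eq_foldl_pairs]
  set pairs := (PySem.List.enumerate matrix).flatMap (fun p =>
      ((PySem.List.enumerate p.2).filter (fun q => decide (q.2 ≠ 0))).map (fun q => (q.1, p.1))) with hp
  have hnd : ((pairs.foldl (fun d q => d.modify q.1 [] (fun l => l ++ [q.2]))
      PySem.Dict.empty).keys).Nodup := by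
    exact PySem.Dict.nodup_keys_foldl_modify_key pairs (fun q => q.1) []
      (fun _ q => fun l => l ++ [q.2]) PySem.Dict.empty (by simp)
  rw [PySem.Dict.items_eq_map_keys _ hnd ([] : List Int)]
  rw [PySem.Dict.keys_foldl_modify_key pairs (fun q => q.1) [] (fun _ q => fun l => l ++ [q.2])]
  refine List.map_congr_left ?_
  intro j _
  congr 1
  rw [PySem.Dict.getD_foldl_modify_append pairs PySem.Dict.empty j]
  simp

-- ===== VERDICT (by name: the statement is the Claim_ definition above) =====
theorem create_transpose_spec : Claim_equal_create_transpose := by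
  intro matrix _
  unfold Spec_create_transpose
  exact create_transpose_eq_alt matrix
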